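-- pv_equiv track=rewrite | github.com/junsooki/LAMAPF-P-Config | tests/test_flow_cpp.py | _no_vertex_conflict
-- ===== SOURCE A (Python) =====
-- def _no_vertex_conflict(paths):
--     max_len = max(len(p) for p in paths)
--     for t in range(max_len):
--         seen = set()
--         for path in paths:
--             if t >= len(path):
--                 continue
--             if path[t] in seen:
--                 return False
--             seen.add(path[t])
--     return True
-- ===== SOURCE B (Python) =====
-- def _no_vertex_conflict(paths):
--     # Path-major single pass over the cells: per-timestep occupancy sets built incrementally.
--     occ = {}
--     for path in paths:
--         for t, v in enumerate(path):
--             s = occ.get(t)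
--             if s is None:
--                 occ[t] = {v}
--             elif v in s:
--                 return False
--             else:
--                 s.add(v)
--     return True
-- ===== Notes on version B (the rewrite author's own statement) =====
-- stated objective: alternative
-- what changed: Instead of scanning every path once per timestep (timestep-major nested loops over range(max_len) x paths with a fresh 'seen' set per step), B makes a single path-major pass over the cells, maintaining a dict of per-timestep occupancy sets; it trades the per-timestep rescan of short-path entries for a dict of sets, cost proportional to the total number of cells.
import Mathlib
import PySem

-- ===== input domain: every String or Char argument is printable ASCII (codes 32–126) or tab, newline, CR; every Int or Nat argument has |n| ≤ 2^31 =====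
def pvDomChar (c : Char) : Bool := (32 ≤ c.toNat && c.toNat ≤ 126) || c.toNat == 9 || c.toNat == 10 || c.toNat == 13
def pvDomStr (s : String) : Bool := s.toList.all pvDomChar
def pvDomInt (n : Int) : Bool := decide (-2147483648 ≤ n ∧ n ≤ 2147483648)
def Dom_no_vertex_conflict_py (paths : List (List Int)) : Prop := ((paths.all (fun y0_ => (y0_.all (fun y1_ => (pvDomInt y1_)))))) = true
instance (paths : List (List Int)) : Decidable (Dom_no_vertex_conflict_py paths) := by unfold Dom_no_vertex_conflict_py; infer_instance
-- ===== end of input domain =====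

-- B replaces A's timestep-major rescan of all paths by one path-major pass over the cells
-- with a dict of per-timestep occupancy sets (a different traversal order, same result).

-- ===== PORT A =====
-- inner loop 'for path in paths' at a fixed timestep t (seen = the Python set 'seen')
def nvcInnerA (t : Int) : List (List Int) → PySem.Set Int → Bool
  | [], _ => true
  | path :: rest, seen =>
    if t ≥ (path.length : Int) then nvcInnerA t rest seen
    else
      let v := PySem.List.pyGetD path t 0   -- exact: 0 ≤ t < len path here
      if PySem.Set.contains seen v then false
      else nvcInnerA t rest (PySem.Set.add seen v)

-- outer loop 'for t in range(max_len)' with early return False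
def nvcOuterA (paths : List (List Int)) : List Int → Bool
  | [] => true
  | t :: ts => if nvcInnerA t paths PySem.Set.empty then nvcOuterA paths ts else false

def no_vertex_conflict_py (paths : List (List Int)) : Bool :=
  match PySem.List.max? (paths.map fun p => (p.length : Int)) (fun x => x) with
  | none => true   -- Python: ValueError (max of empty sequence); excluded by Pre_
  | some maxLen => nvcOuterA paths (PySem.List.pyRange 0 maxLen 1)

-- ===== PORT B =====
-- inner loop 'for t, v in enumerate(path)' over one path's cells, threading the dict occ;
-- none = early 'return False'
def nvcPathB : List (Int × Int) → PySem.Dict Int (PySem.Set Int) → Option (PySem.Dict Int (PySem.Set Int))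
  | [], occ => some occ
  | (t, v) :: rest, occ =>
    match occ.get? t with
    | none => nvcPathB rest (occ.insert t (PySem.Set.add PySem.Set.empty v))
    | some s =>
      if PySem.Set.contains s v then none
      else nvcPathB rest (occ.insert t (PySem.Set.add s v))

-- outer loop 'for path in paths'
def nvcOuterB : List (List Int) → PySem.Dict Int (PySem.Set Int) → Bool
  | [], _ => true
  | p :: rest, occ =>
    match nvcPathB (PySem.List.enumerate p 0) occ with
    | none => false
    | some occ' => nvcOuterB rest occ'

def no_vertex_conflict_py_alt (paths : List (List Int)) : Bool :=
  nvcOuterB paths PySem.Dict.empty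

-- ===== PRECONDITION & SPEC =====
-- Pre_ excludes only the empty list of paths, on which Python A raises ValueError (max of empty sequence).
def Pre_no_vertex_conflict_py (paths : List (List Int)) : Prop := paths ≠ []
instance (paths : List (List Int)) : Decidable (Pre_no_vertex_conflict_py paths) := by unfold Pre_no_vertex_conflict_py; infer_instance
def pvWitness_no_vertex_conflict_py : List (List Int) := [[0, 1], [1, 0]]

def Spec_no_vertex_conflict_py (paths : List (List Int)) (out : Bool) : Prop := out = no_vertex_conflict_py_alt paths
instance (paths : List (List Int)) (out : Bool) : Decidable (Spec_no_vertex_conflict_py paths out) := by unfold Spec_no_vertex_conflict_py; infer_instance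

-- ===== CLAIM (what is proved, stated in full; the proofs are below) =====
def Claim_equal_no_vertex_conflict_py : Prop := ∀ (paths : List (List Int)), Dom_no_vertex_conflict_py paths → Pre_no_vertex_conflict_py paths → Spec_no_vertex_conflict_py paths (no_vertex_conflict_py paths)

-- ===== LEMMAS AND PROOFS =====

-- the column of vertices occupied at timestep t (in path order)
def nvcCol (t : Int) (paths : List (List Int)) : List Int :=
  paths.filterMap (fun p => PySem.List.pyGet? p t)

theorem nvcInnerA_iff (t : Int) (ht : 0 ≤ t) (paths : List (List Int)) (seen : PySem.Set Int) :
    nvcInnerA t paths seen = true ↔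
      (nvcCol t paths).Nodup ∧ ∀ v ∈ nvcCol t paths, v ∉ seen := by
  induction paths generalizing seen with
  | nil => simp [nvcInnerA, nvcCol]
  | cons p rest ih =>
    by_cases hlen : t ≥ (p.length : Int)
    · have hnone : PySem.List.pyGet? p t = none := by
        rw [PySem.List.pyGet?_eq_none_iff]
        simp [PySem.Raise.InRange]; omega
      simp only [nvcInnerA, if_pos hlen, nvcCol, List.filterMap_cons, hnone]
      exact ih seen
    · have hlen' : t < (p.length : Int) := lt_of_not_ge hlen
      have hsome : PySem.List.pyGet? p t = some (PySem.List.pyGetD p t 0) := by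
        rw [PySem.List.pyGet?_of_nonneg p ht, PySem.List.pyGetD_eq_getElem p 0 ht hlen']
        rw [List.getElem?_eq_getElem (by omega : t.toNat < p.length)]
      simp only [nvcInnerA, if_neg hlen, nvcCol, List.filterMap_cons, hsome]
      simp only [nvcCol] at ih
      generalize PySem.List.pyGetD p t 0 = v
      by_cases hmem : v ∈ seen
      · have hc : PySem.Set.contains seen v = true := (PySem.Set.contains_iff seen v).mpr hmem
        simp only [hc, if_true]
        constructor
        · intro h; exact absurd h (by simp)
        · rintro ⟨-, hall⟩
          exact absurd (hall v (by simp)) (by simp [hmem])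
      · have hc : PySem.Set.contains seen v = false := by
          rw [← Bool.not_eq_true]
          simp [hmem]
        simp only [hc, Bool.false_eq_true, if_false]
        rw [ih (PySem.Set.add seen v)]
        simp only [List.nodup_cons, List.mem_cons]
        constructor
        · rintro ⟨hnd, hall⟩
          refine ⟨⟨fun hvmem => ?_, hnd⟩, ?_⟩
          · exact hall v hvmem ((PySem.Set.mem_add seen v v).mpr (Or.inr rfl))
          · rintro u (rfl | hu)
            · exact hmem
            · intro huseen
              exact hall u hu ((PySem.Set.mem_add seen v u).mpr (Or.inl huseen))
        · rintro ⟨⟨hvnot, hnd⟩, hall⟩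
          refine ⟨hnd, fun u hu huadd => ?_⟩
          rcases (PySem.Set.mem_add seen v u).mp huadd with huseen | rfl
          · exact hall u (Or.inr hu) huseen
          · exact hvnot hu

theorem nvcOuterA_iff (paths : List (List Int)) (ts : List Int) :
    nvcOuterA paths ts = true ↔ ∀ t ∈ ts, nvcInnerA t paths PySem.Set.empty = true := by
  induction ts with
  | nil => simp [nvcOuterA]
  | cons t ts ih =>
    simp only [nvcOuterA, List.mem_cons]
    by_cases h : nvcInnerA t paths PySem.Set.empty = true
    · rw [if_pos h, ih]
      constructor
      · rintro hall u (rfl | hu); exact h; exact hall u hu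
      · intro hall u hu; exact hall u (Or.inr hu)
    · rw [if_neg h]
      constructor
      · intro hf; exact absurd hf (by simp)
      · intro hall; exact absurd (hall t (Or.inl rfl)) h

-- A = true ↔ every column (at any t ≥ 0) has no duplicate, given a nonempty paths list
theorem portA_iff (paths : List (List Int)) (hne : paths ≠ []) :
    no_vertex_conflict_py paths = true ↔ ∀ t : Int, 0 ≤ t → (nvcCol t paths).Nodup := by
  obtain ⟨m, hm⟩ : ∃ m, PySem.List.max? (paths.map fun p => (p.length : Int)) (fun x => x) = some m := by
    rcases h : PySem.List.max? (paths.map fun p => (p.length : Int)) (fun x => x) with _ | m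
    · rw [PySem.List.max?_eq_none_iff] at h
      simp at h; exact absurd h hne
    · exact ⟨m, h⟩
  have hmax : ∀ p ∈ paths, (p.length : Int) ≤ m := by
    intro p hp
    have := PySem.List.max?_isMax hm ((p.length : Int)) (by simp; exact ⟨p, hp, rfl⟩)
    simpa using this
  simp only [no_vertex_conflict_py, hm]
  rw [nvcOuterA_iff]
  constructor
  · intro h t ht
    by_cases htm : t < m
    · have := h t (by rw [PySem.List.mem_pyRange_one]; exact ⟨ht, htm⟩)
      exact ((nvcInnerA_iff t ht paths PySem.Set.empty).mp this).1
    · have hcol : nvcCol t paths = [] := by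
        simp only [nvcCol, List.filterMap_eq_nil_iff]
        intro p hp
        rw [PySem.List.pyGet?_eq_none_iff]
        have := hmax p hp
        simp [PySem.Raise.InRange]; omega
      simp [hcol]
  · intro h t htmem
    rw [PySem.List.mem_pyRange_one] at htmem
    rw [nvcInnerA_iff t htmem.1]
    exact ⟨h t htmem.1, by intro v _ hv; simp [PySem.Set.empty] at hv⟩

-- B-side invariant: occ reflects the columns of the processed paths plus the cells C
-- already inserted from the current path (only timesteps t ≥ 0 ever occur)
def nvcInv (occ : PySem.Dict Int (PySem.Set Int)) (processed : List (List Int))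
    (C : List (Int × Int)) : Prop :=
  ∀ t : Int, 0 ≤ t → ∀ v : Int,
    (match occ.get? t with | none => False | some s => v ∈ s) ↔
      (v ∈ nvcCol t processed ∨ (t, v) ∈ C)

theorem nvcCol_append (t : Int) (xs ys : List (List Int)) :
    nvcCol t (xs ++ ys) = nvcCol t xs ++ nvcCol t ys := by
  simp [nvcCol]

theorem nvcPathB_spec (L : List (Int × Int)) :
    ∀ (occ : PySem.Dict Int (PySem.Set Int)) (processed : List (List Int)) (C : List (Int × Int)),
      nvcInv occ processed C →
      (∀ c ∈ L, 0 ≤ c.1) →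
      (∀ c ∈ L, ∀ c' ∈ C, c.1 ≠ c'.1) →
      L.Pairwise (fun a b => a.1 ≠ b.1) →
      ((∀ c ∈ L, c.2 ∉ nvcCol c.1 processed) →
          ∃ occ', nvcPathB L occ = some occ' ∧ nvcInv occ' processed (C ++ L)) ∧
      ((∃ c ∈ L, c.2 ∈ nvcCol c.1 processed) → nvcPathB L occ = none) := by
  induction L with
  | nil =>
    intro occ processed C hinv _ _ _
    exact ⟨fun _ => ⟨occ, rfl, by simpa using hinv⟩, by rintro ⟨c, hc, -⟩; simp at hc⟩
  | cons c L ih =>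
    rintro occ processed C hinv hpos hdisj hpw
    obtain ⟨t, v⟩ := c
    have ht : (0:Int) ≤ t := hpos (t, v) (List.mem_cons_self ..)
    have hnotC : ∀ v' : Int, (t, v') ∉ C := by
      intro v' hv'
      exact hdisj (t, v) (List.mem_cons_self ..) (t, v') hv' rfl
    have hkey : ∀ v' : Int,
        (match occ.get? t with | none => False | some s => v' ∈ s) ↔ v' ∈ nvcCol t processed := by
      intro v'
      rw [hinv t ht v']
      simp [hnotC v']
    have hstep : ∀ (s : PySem.Set Int),
        (∀ v' : Int, v' ∈ s ↔ v' ∈ nvcCol t processed) →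
        nvcInv (occ.insert t (PySem.Set.add s v)) processed (C ++ [(t, v)]) := by
      intro s hs t' ht' v'
      by_cases hteq : t' = t
      · subst hteq
        rw [PySem.Dict.get?_insert_self]
        show v' ∈ PySem.Set.add s v ↔ _
        rw [PySem.Set.mem_add s v v', hs v']
        constructor
        · rintro (hcol | rfl)
          · exact Or.inl hcol
          · exact Or.inr (List.mem_append.mpr (Or.inr (List.mem_singleton.mpr rfl)))
        · rintro (hcol | hC)
          · exact Or.inl hcol
          · rcases List.mem_append.mp hC with h | h
            · exact absurd h (hnotC v')
            · rw [List.mem_singleton] at h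
              exact Or.inr (congrArg Prod.snd h)
      · rw [PySem.Dict.get?_insert_of_ne occ (PySem.Set.add s v) hteq]
        rw [hinv t' ht' v']
        constructor
        · rintro (h | h)
          · exact Or.inl h
          · exact Or.inr (List.mem_append.mpr (Or.inl h))
        · rintro (h | h)
          · exact Or.inl h
          · rcases List.mem_append.mp h with h | h
            · exact Or.inr h
            · rw [List.mem_singleton] at h
              exact absurd (congrArg Prod.fst h) hteq
    have hLpos : ∀ c' ∈ L, (0:Int) ≤ c'.1 := fun c' hc' => hpos c' (List.mem_cons_of_mem _ hc')
    have hLdisj : ∀ c' ∈ L, ∀ c'' ∈ C ++ [(t, v)], c'.1 ≠ c''.1 := by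
      intro c' hc' c'' hc''
      rcases List.mem_append.mp hc'' with h | h
      · exact hdisj c' (List.mem_cons_of_mem _ hc') c'' h
      · rw [List.mem_singleton] at h; subst h
        exact ((List.pairwise_cons.mp hpw).1 c' hc').symm
    have hLpw : L.Pairwise (fun a b => a.1 ≠ b.1) := (List.pairwise_cons.mp hpw).2
    by_cases hconf : v ∈ nvcCol t processed
    · -- this cell conflicts: the stored set contains v, so B returns none
      have hget : ∃ s, occ.get? t = some s ∧ PySem.Set.contains s v = true := by
        rcases hg : occ.get? t with _ | s
        · exact absurd ((hkey v).mpr hconf) (by simp [hg])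
        · refine ⟨s, rfl, (PySem.Set.contains_iff s v).mpr ?_⟩
          have := (hkey v).mpr hconf
          simpa [hg] using this
      obtain ⟨s, hg, hc⟩ := hget
      constructor
      · intro hall
        exact absurd hconf (hall (t, v) (List.mem_cons_self ..))
      · intro _
        simp only [nvcPathB, hg, hc, if_true]
    · -- no conflict at this cell: insert and recurse
      have key : ∃ occ₁, nvcPathB ((t, v) :: L) occ = nvcPathB L occ₁ ∧
          nvcInv occ₁ processed (C ++ [(t, v)]) := by
        rcases hg : occ.get? t with _ | s
        · refine ⟨occ.insert t (PySem.Set.add PySem.Set.empty v), by simp only [nvcPathB, hg], ?_⟩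
          apply hstep
          intro v'
          have h := hkey v'
          simp only [hg] at h
          simp [PySem.Set.empty, ← h]
        · have hvs : v ∉ s := by
            intro hv
            exact hconf ((hkey v).mp (by simp [hg, hv]))
          have hc : PySem.Set.contains s v = false := by
            rw [← Bool.not_eq_true]
            simp [hvs]
          refine ⟨occ.insert t (PySem.Set.add s v),
            by simp only [nvcPathB, hg, hc, Bool.false_eq_true, if_false], ?_⟩
          apply hstep
          intro v'
          have h := hkey v'
          simpa only [hg] using h
      obtain ⟨occ₁, heq, hinv₁⟩ := key
      have hrec := ih occ₁ processed (C ++ [(t, v)]) hinv₁ hLpos hLdisj hLpw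
      constructor
      · intro hall
        obtain ⟨occ', h1, h2⟩ := hrec.1 (fun c' hc' => hall c' (List.mem_cons_of_mem _ hc'))
        exact ⟨occ', by rw [heq]; exact h1, by simpa [List.append_assoc] using h2⟩
      · rintro ⟨c', hc', hcc⟩
        rcases List.mem_cons.mp hc' with rfl | hmem
        · exact absurd hcc hconf
        · rw [heq]; exact hrec.2 ⟨c', hmem, hcc⟩

-- cells of a path ↔ its column contribution
theorem mem_enumerate_iff_pyGet? (p : List Int) (t v : Int) (ht : 0 ≤ t) :
    (t, v) ∈ PySem.List.enumerate p 0 ↔ PySem.List.pyGet? p t = some v := by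
  rw [PySem.List.mem_enumerate_iff, PySem.List.pyGet?_of_nonneg p ht]
  constructor
  · rintro ⟨k, hk, heq⟩
    rw [Prod.ext_iff] at heq
    obtain ⟨h1, h2⟩ := heq
    simp only [zero_add] at h1
    simp only at h2
    have hkt : t.toNat = k := by omega
    rw [hkt, List.getElem?_eq_getElem hk, h2]
  · intro hget
    have hlt : t.toNat < p.length := by
      by_contra hcon
      rw [List.getElem?_eq_none (by omega)] at hget
      simp at hget
    refine ⟨t.toNat, hlt, ?_⟩
    rw [List.getElem?_eq_getElem hlt] at hget
    rw [Prod.ext_iff]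
    refine ⟨by simp; omega, by simpa using hget.symm⟩

theorem nvcOuterB_iff (rest : List (List Int)) :
    ∀ (occ : PySem.Dict Int (PySem.Set Int)) (processed : List (List Int)),
      nvcInv occ processed [] →
      (∀ t : Int, 0 ≤ t → (nvcCol t processed).Nodup) →
      (nvcOuterB rest occ = true ↔
        ∀ t : Int, 0 ≤ t → (nvcCol t (processed ++ rest)).Nodup) := by
  induction rest with
  | nil =>
    intro occ processed _ hnd
    simp [nvcOuterB]
    intro t ht; simpa using hnd t ht
  | cons p rest ih =>
    intro occ processed hinv hnd
    have hpos : ∀ c ∈ PySem.List.enumerate p 0, (0:Int) ≤ c.1 := by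
      intro c hc
      rw [PySem.List.mem_enumerate_iff] at hc
      obtain ⟨k, hk, rfl⟩ := hc; simp
    have hpw : (PySem.List.enumerate p 0).Pairwise (fun a b => a.1 ≠ b.1) :=
      (PySem.List.pairwise_lt_enumerate p 0).imp (fun h => ne_of_lt h)
    have hspec := nvcPathB_spec (PySem.List.enumerate p 0) occ processed [] hinv hpos
      (by intro c _ c' hc'; simp at hc') hpw
    by_cases hconf : ∃ c ∈ PySem.List.enumerate p 0, c.2 ∈ nvcCol c.1 processed
    · -- conflict: both sides false
      have hnone := hspec.2 hconf
      simp only [nvcOuterB, hnone]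
      obtain ⟨⟨t, v⟩, hc, hcol⟩ := hconf
      have ht : (0:Int) ≤ t := hpos _ hc
      have hvp : PySem.List.pyGet? p t = some v := (mem_enumerate_iff_pyGet? p t v ht).mp hc
      constructor
      · intro h; exact absurd h (by simp)
      · intro hall
        have hnd2 := hall t ht
        rw [nvcCol_append, List.nodup_append] at hnd2
        have hvm : v ∈ nvcCol t (p :: rest) := by
          simp [nvcCol, hvp]
        have hcol' : v ∈ nvcCol t processed := hcol
        exact (hnd2.2.2 v hcol' v hvm rfl).elim
    · simp only [not_exists, not_and] at hconf
      obtain ⟨occ', hsome, hinv'⟩ := hspec.1 hconf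
      have hinv'' : nvcInv occ' (processed ++ [p]) [] := by
        intro t ht v
        rw [hinv' t ht v]
        rw [nvcCol_append]
        simp only [List.mem_append, List.not_mem_nil, or_false, List.nil_append]
        have : v ∈ nvcCol t [p] ↔ (t, v) ∈ PySem.List.enumerate p 0 := by
          rw [mem_enumerate_iff_pyGet? p t v ht]
          cases h : PySem.List.pyGet? p t <;>
            simp [nvcCol, h, eq_comm]
        rw [this]
      have hnd' : ∀ t : Int, 0 ≤ t → (nvcCol t (processed ++ [p])).Nodup := by
        intro t ht
        rw [nvcCol_append]
        rw [List.nodup_append]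
        refine ⟨hnd t ht, ?_, ?_⟩
        · -- the single-path column has at most one element
          cases h : PySem.List.pyGet? p t <;> simp [nvcCol, h]
        · intro v hv1 w hw2
          rcases h : PySem.List.pyGet? p t with _ | u
          · simp [nvcCol, h] at hw2
          · simp [nvcCol, h] at hw2
            subst hw2
            intro heq
            exact hconf (t, w) ((mem_enumerate_iff_pyGet? p t w ht).mpr h) (heq ▸ hv1)
      simp only [nvcOuterB, hsome]
      rw [ih occ' (processed ++ [p]) hinv'' hnd']
      constructor <;> intro h t ht <;> have := h t ht <;> simpa [List.append_assoc] using this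

theorem portB_iff (paths : List (List Int)) :
    no_vertex_conflict_py_alt paths = true ↔ ∀ t : Int, 0 ≤ t → (nvcCol t paths).Nodup := by
  have h := nvcOuterB_iff paths PySem.Dict.empty []
    (by intro t ht v; rw [PySem.Dict.get?_empty]; simp [nvcCol])
    (by intro t ht; simp [nvcCol])
  simpa [no_vertex_conflict_py_alt] using h

-- ===== VERDICT (by name: the statement is the Claim_ definition above) =====
theorem no_vertex_conflict_py_spec : Claim_equal_no_vertex_conflict_py := by
  intro paths _ hpre
  unfold Spec_no_vertex_conflict_py
  have hA := portA_iff paths hpre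
  have hB := portB_iff paths
  cases hb : no_vertex_conflict_py_alt paths
  · cases ha : no_vertex_conflict_py paths
    · rfl
    · exact absurd (hB.mpr (hA.mp ha)) (by simp [hb])
  · exact hA.mpr (hB.mp hb)
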